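-- pv_equiv track=rewrite | github.com/davidmwhynot/practice | pythonClass/8/main.py | stripped_is_second_degree
-- ===== SOURCE A (Python) =====
-- def deltas(a):
-- 	buffer = [] # placeholder for computed deltas
-- 	for i in range(1, len(a)): # loop through the input list, starting at the second element because we want to avoid index out of bound errors
-- 		buffer.append(a[i] - a[i-1]) # subtract the previous element in the list from the current element
-- 	return buffer; # return the results
--
-- def stripped_is_second_degree(a):
-- 	for i in deltas(deltas(deltas(a))):
-- 		if i != 0:
-- 			return False
-- 	for i in deltas(a):
-- 		if i != 0:
-- 			break
-- 	else:
-- 		return False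
-- 	for i in deltas(deltas(a)):
-- 		if i != 0:
-- 			break
-- 	else:
-- 		return False
-- 	return True
-- ===== SOURCE B (Python) =====
-- def stripped_is_second_degree(a):
--     d = [y - x for x, y in zip(a, a[1:])]
--     dd = [y - x for x, y in zip(d, d[1:])]
--     return bool(dd) and dd[0] != 0 and all(x == dd[0] for x in dd)
-- ===== Notes on version B (the rewrite author's own statement) =====
-- stated objective: simpler
-- what changed: A differences the list up to three separate times (six deltas passes in total) and runs three for-else scans with early returns; B builds the first and second differences once via zip comprehensions and returns a single 'second differences are nonempty, constant and nonzero' check.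
import Mathlib
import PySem

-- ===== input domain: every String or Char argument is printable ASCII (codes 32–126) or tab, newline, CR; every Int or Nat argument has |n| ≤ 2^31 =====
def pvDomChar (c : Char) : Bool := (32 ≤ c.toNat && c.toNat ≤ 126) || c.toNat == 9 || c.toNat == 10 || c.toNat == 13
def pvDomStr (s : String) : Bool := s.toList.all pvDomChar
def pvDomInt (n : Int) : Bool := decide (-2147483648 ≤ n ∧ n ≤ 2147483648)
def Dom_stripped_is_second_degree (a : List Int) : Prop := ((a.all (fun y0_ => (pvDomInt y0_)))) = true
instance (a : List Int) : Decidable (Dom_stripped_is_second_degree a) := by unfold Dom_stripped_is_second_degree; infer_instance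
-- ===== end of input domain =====

-- B replaces A's three repeated differencing passes and for-else scans by one
-- "second differences are nonempty, constant and nonzero" check (simpler decomposition).


-- ===== PORT A =====
-- deltas(a): loop i in range(1, len(a)), append a[i] - a[i-1] (indices always in range)
def deltasA (a : List Int) : List Int :=
  (PySem.List.pyRange 1 (a.length : Int) 1).foldl
    (fun buffer i => buffer ++ [PySem.List.pyGetD a i 0 - PySem.List.pyGetD a (i - 1) 0]) []

-- three scans with early return / for-else, in A's order
def stripped_is_second_degree (a : List Int) : Bool :=
  if (deltasA (deltasA (deltasA a))).any (fun i => i ≠ 0) then false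
  else if !(deltasA a).any (fun i => i ≠ 0) then false
  else if !(deltasA (deltasA a)).any (fun i => i ≠ 0) then false
  else true

-- ===== PORT B =====
-- [y - x for x, y in zip(a, a[1:])]
def deltasB (a : List Int) : List Int :=
  (a.zip (PySem.List.slice a (some 1) none)).map (fun p => p.2 - p.1)

def stripped_is_second_degree_alt (a : List Int) : Bool :=
  let d := deltasB a
  let dd := deltasB d
  match dd with
  | [] => false
  | x :: _ => decide (x ≠ 0) && dd.all (fun y => y == x)

-- ===== PRECONDITION & SPEC =====
def Spec_stripped_is_second_degree (a : List Int) (out : Bool) : Prop := out = stripped_is_second_degree_alt a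
instance (a : List Int) (out : Bool) : Decidable (Spec_stripped_is_second_degree a out) := by unfold Spec_stripped_is_second_degree; infer_instance

-- ===== CLAIM (what is proved, stated in full; the proofs are below) =====
def Claim_equal_stripped_is_second_degree : Prop := ∀ (a : List Int), Dom_stripped_is_second_degree a → Spec_stripped_is_second_degree a (stripped_is_second_degree a)

-- ===== LEMMAS AND PROOFS =====

-- cons form of B's differencing
theorem deltasB_cons2 (x y : Int) (l : List Int) :
    deltasB (x :: y :: l) = (y - x) :: deltasB (y :: l) := by
  simp [deltasB, PySem.List.slice_from_one]

theorem deltasB_nil : deltasB [] = [] := by simp [deltasB]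
theorem deltasB_single (x : Int) : deltasB [x] = [] := by simp [deltasB, PySem.List.slice_from_one]

-- the two differencing routines agree
theorem deltasA_eq_deltasB (a : List Int) : deltasA a = deltasB a := by
  unfold deltasA
  rw [PySem.List.foldl_append_singleton_eq_map, PySem.List.pyRange_one, List.map_map,
    List.nil_append]
  apply List.ext_getElem
  · simp [deltasB, PySem.List.slice_from_one]
  · intro i h1 h2
    have hi : i + 1 < a.length := by
      simp at h1; omega
    simp only [List.getElem_map, List.getElem_range, Function.comp_apply]
    have e1 : (1 : Int) + (i : Int) = ((i + 1 : Nat) : Int) := by push_cast; ring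
    have e2 : ((i + 1 : Nat) : Int) - 1 = ((i : Nat) : Int) := by push_cast; ring
    rw [e1, e2, PySem.List.pyGetD_natCast, PySem.List.pyGetD_natCast]
    simp [deltasB, PySem.List.slice_from_one, List.getElem_zip, List.getD_eq_getElem?_getD,
      List.getElem?_eq_getElem hi, List.getElem?_eq_getElem (by omega : i < a.length)]

-- (deltasB (x::l)).any (≠ 0) = false  ↔  every element of l equals x
theorem deltasB_all_zero_iff (x : Int) (l : List Int) :
    ((deltasB (x :: l)).any (fun i => i ≠ 0) = false) ↔ ∀ y ∈ l, y = x := by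
  induction l generalizing x with
  | nil => simp [deltasB_single]
  | cons y t ih =>
    rw [deltasB_cons2]
    simp only [List.any_cons, Bool.or_eq_false_iff]
    constructor
    · rintro ⟨h1, h2⟩
      have hyx : y = x := by
        by_contra h; simp [sub_eq_zero] at h1; exact h h1
      intro z hz
      rcases List.mem_cons.mp hz with h | h
      · exact hyx ▸ h
      · exact hyx ▸ ((ih y).mp h2 z h)
    · intro h
      have hyx : y = x := h y (by simp)
      refine ⟨by simp [hyx], (ih y).mpr ?_⟩
      intro z hz; exact (h z (by simp [hz])).trans hyx.symm

-- deltasB d nonempty forces d = u :: v :: t with head (deltasB d) = v - u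
theorem deltasB_head (d : List Int) (x : Int) (rest : List Int)
    (h : deltasB d = x :: rest) : ∃ u v t, d = u :: v :: t ∧ x = v - u := by
  match d with
  | [] => simp [deltasB_nil] at h
  | [u] => simp [deltasB_single] at h
  | u :: v :: t =>
    rw [deltasB_cons2] at h
    exact ⟨u, v, t, rfl, (List.cons_eq_cons.mp h).1.symm⟩

-- ===== VERDICT (by name: the statement is the Claim_ definition above) =====
theorem stripped_is_second_degree_spec : Claim_equal_stripped_is_second_degree := by
  intro a _
  unfold Spec_stripped_is_second_degree stripped_is_second_degree stripped_is_second_degree_alt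
  simp only [deltasA_eq_deltasB]
  set d := deltasB a with hd
  cases hdd : deltasB d with
  | nil =>
    simp only [deltasB_nil]
    by_cases h1 : d.any (fun i => i ≠ 0) = true <;> simp [*]
  | cons x rest =>
    obtain ⟨u, v, t, hdut, hx⟩ := deltasB_head d x rest hdd
    by_cases hconst : ∀ y ∈ rest, y = x
    · have hddd : (deltasB (x :: rest)).any (fun i => i ≠ 0) = false :=
        (deltasB_all_zero_iff x rest).mpr hconst
      by_cases hx0 : x = 0
      · subst hx0
        have hdd0 : ((0 :: rest).any (fun i => decide (i ≠ 0))) = false := by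
          simp; intro y hy; exact hconst y hy
        simp only [hdd0, hddd]
        simp
      · -- x ≠ 0: dd has a nonzero, and d[1]-d[0] = x ≠ 0 forces a nonzero in d
        have hdany : d.any (fun i => i ≠ 0) = true := by
          rw [hdut]
          by_cases hu : u = 0
          · have hv : v ≠ 0 := by subst hu; simpa [hx, sub_eq_zero] using hx0
            simp [hu, hv]
          · simp [hu]
        have hddany : ((x :: rest).any (fun i => i ≠ 0)) = true := by simp [hx0]
        simp only [hddd, hdany, hddany]
        simp [hx0, List.all_eq_true]
        intro y hy; exact hconst y hy
    · -- not constant: third differences contain a nonzero → A false; B's all-check fails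
      have hddd : (deltasB (x :: rest)).any (fun i => i ≠ 0) = true := by
        by_contra h
        exact hconst ((deltasB_all_zero_iff x rest).mp (by simpa using h))
      simp only [hddd]
      simp only [if_true]
      push Not at hconst
      obtain ⟨y, hy, hyx⟩ := hconst
      simp
      intro _
      exact ⟨y, hy, hyx⟩
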